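-- pv_equiv track=rewrite | github.com/lingsoft/utu-bert-ner-fi-elg | utils.py | tags_to_spans
-- ===== SOURCE A (Python) =====
-- def iob2_span_ends(curr_type, tag):
--     if curr_type is None:
--         return False
--     elif tag == 'I-{}'.format(curr_type):
--         return False
--     elif tag == 'O' or tag[0] == 'B':
--         return True
--     else:
--         # assert curr_type != tag[2:], 'internal error'
--         return True    # non-IOB2 or tag sequence error
--
-- def iob2_span_starts(curr_type, tag):
--     if tag == 'O':
--         return False
--     elif tag[0] == 'B':
--         return True
--     elif curr_type is None:
--         return True    # non-IOB2 or tag sequence error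
--     else:
--         # assert tag == 'I-{}'.format(curr_type), 'internal error'
--         return False
--
-- def tags_to_spans(text, tokens, tags):
--     spans = []
--     offset, curr_type, start = 0, None, None
--     # assert len(tokens) == len(tags)
--     for token, tag in zip(tokens, tags):
--         if iob2_span_ends(curr_type, tag):
--             spans.append((curr_type, {"start": start, "end": offset}))
--             curr_type, start = None, None
--         while offset < len(text) and text[offset].isspace():
--             offset += 1
--         if text[offset:offset+len(token)] != token:
--             raise ValueError('text mismatch')
--         if iob2_span_starts(curr_type, tag):
--             curr_type, start = tag[2:], offset
--         offset += len(token)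
--     if curr_type is not None:
--         spans.append((curr_type, {"start": start, "end": offset}))
--     return spans
-- ===== SOURCE B (Python) =====
-- def tags_to_spans(text, tokens, tags):
--     # pass 1: align tokens to character offsets (whitespace skipping + verification)
--     offsets = []
--     pos = 0
--     for token in tokens[:len(tags)]:
--         while pos < len(text) and text[pos].isspace():
--             pos += 1
--         if text[pos:pos + len(token)] != token:
--             raise ValueError('text mismatch')
--         offsets.append((pos, pos + len(token)))
--         pos += len(token)
--     # pass 2: IOB2 state machine over (tag, offset) pairs
--     spans = []
--     curr_type, start, prev_end = None, None, 0
--     for tag, (s, e) in zip(tags, offsets):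
--         if curr_type is not None and tag != 'I-' + curr_type:
--             spans.append((curr_type, {"start": start, "end": prev_end}))
--             curr_type = None
--         if tag != 'O' and (tag.startswith('B') or curr_type is None):
--             curr_type, start = tag[2:], s
--         prev_end = e
--     if curr_type is not None:
--         spans.append((curr_type, {"start": start, "end": prev_end}))
--     return spans
-- ===== Notes on version B (the rewrite author's own statement) =====
-- stated objective: alternative
-- what changed: A interleaves text alignment and IOB2 span tracking in one loop with two option-returning helper predicates; B first computes each token's (start,end) character offsets in a standalone alignment pass and then runs a compact two-condition IOB2 state machine over zip(tags, offsets), threading prev_end instead of re-reading the text.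
import Mathlib
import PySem

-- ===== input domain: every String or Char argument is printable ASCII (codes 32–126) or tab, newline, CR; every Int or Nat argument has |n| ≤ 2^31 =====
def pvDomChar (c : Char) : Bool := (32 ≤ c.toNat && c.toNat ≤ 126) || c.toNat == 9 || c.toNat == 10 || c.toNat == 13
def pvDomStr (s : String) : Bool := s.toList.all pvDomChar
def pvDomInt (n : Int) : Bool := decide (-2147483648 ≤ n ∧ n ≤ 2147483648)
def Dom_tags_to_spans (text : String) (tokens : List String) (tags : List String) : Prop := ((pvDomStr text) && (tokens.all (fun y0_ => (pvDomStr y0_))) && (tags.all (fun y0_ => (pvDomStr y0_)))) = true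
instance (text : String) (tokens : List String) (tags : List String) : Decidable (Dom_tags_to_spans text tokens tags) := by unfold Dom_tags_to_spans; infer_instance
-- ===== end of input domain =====

-- B restructures A's single interleaved loop into an alignment pass producing token offsets
-- followed by a separate IOB2 state machine over zip(tags, offsets); same return value on Pre_.

-- shared helpers: both Python sources contain the identical whitespace-skip while loop,
-- and both build the span dict {"start": s, "end": e}
def pvSkipWsAux (cs : List Char) (fuel pos : Nat) : Nat :=
  match fuel with
  | 0 => pos
  | fuel + 1 =>
    if h : pos < cs.length then
      if PySem.Chars.isspace cs[pos] then pvSkipWsAux cs fuel (pos + 1) else pos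
    else pos

def pvSkipWs (cs : List Char) (pos : Nat) : Nat := pvSkipWsAux cs (cs.length - pos) pos

def pvSpanDict (s e : Nat) : List (String × Int) := [("start", (s : Int)), ("end", (e : Int))]

-- ===== PORT A =====
def iob2_span_ends (currType : Option (List Char)) (tag : List Char) : Option Bool :=
  match currType with
  | none => some false
  | some t =>
    if tag = 'I' :: '-' :: t then some false
    else if tag = ['O'] then some true
    else
      match PySem.List.pyGet? tag 0 with
      | none => none                              -- tag[0] on empty tag: IndexError
      | some c => if c = 'B' then some true else some true

def iob2_span_starts (currType : Option (List Char)) (tag : List Char) : Option Bool :=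
  if tag = ['O'] then some false
  else
    match PySem.List.pyGet? tag 0 with
    | none => none                                -- tag[0] on empty tag: IndexError
    | some c =>
      if c = 'B' then some true
      else
        match currType with
        | none => some true
        | some _ => some false

def tagsToSpansLoopA (cs : List Char) (pairs : List (List Char × List Char))
    (offset : Nat) (curr : Option (List Char × Nat))
    (spans : List (String × (List (String × Int)))) :
    Option (List (String × (List (String × Int)))) :=
  match pairs with
  | [] =>
    some (match curr with
          | some (t, st) => spans ++ [(String.ofList t, pvSpanDict st offset)]
          | none => spans)
  | (token, tag) :: rest =>
    match iob2_span_ends (curr.map Prod.fst) tag with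
    | none => none
    | some ends =>
      let state :=
        if ends then
          match curr with
          | some (t, st) => (spans ++ [(String.ofList t, pvSpanDict st offset)], (none : Option (List Char × Nat)))
          | none => (spans, (none : Option (List Char × Nat)))   -- unreachable: ends = true forces curr ≠ none
        else (spans, curr)
      let offset' := pvSkipWs cs offset
      if PySem.List.slice cs (some (offset' : Int)) (some ((offset' : Int) + (token.length : Int))) ≠ token then
        none                                       -- raise ValueError('text mismatch')
      else
        match iob2_span_starts (state.2.map Prod.fst) tag with
        | none => none
        | some starts =>
          let curr' := if starts then some (PySem.List.slice tag (some 2) none, offset') else state.2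
          tagsToSpansLoopA cs rest (offset' + token.length) curr' state.1

def tags_to_spans (text : String) (tokens : List String) (tags : List String) :
    List (String × (List (String × Int))) :=
  (tagsToSpansLoopA text.toList ((tokens.map String.toList).zip (tags.map String.toList)) 0 none []).getD []

-- ===== PORT B =====
-- pass 1 of Source B: character offsets (start, end) of each token, none = ValueError
def pvOffsets (cs : List Char) (toks : List (List Char)) (pos : Nat) : Option (List (Nat × Nat)) :=
  match toks with
  | [] => some []
  | t :: rest =>
    let pos' := pvSkipWs cs pos
    if PySem.List.slice cs (some (pos' : Int)) (some ((pos' : Int) + (t.length : Int))) ≠ t then none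
    else
      match pvOffsets cs rest (pos' + t.length) with
      | none => none
      | some offs => some ((pos', pos' + t.length) :: offs)

-- pass 2 of Source B: the loop body of the IOB2 state machine; state = (spans, curr, prev_end)
def pvStep (st : List (String × (List (String × Int))) × Option (List Char × Nat) × Nat)
    (p : List Char × Nat × Nat) :
    List (String × (List (String × Int))) × Option (List Char × Nat) × Nat :=
  let closed :=
    match st.2.1 with
    | some (ct, s0) =>
      if p.1 ≠ 'I' :: '-' :: ct then (st.1 ++ [(String.ofList ct, pvSpanDict s0 st.2.2)], (none : Option (List Char × Nat)))
      else (st.1, some (ct, s0))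
    | none => (st.1, (none : Option (List Char × Nat)))
  let curr' :=
    if p.1 ≠ ['O'] ∧ (PySem.Chars.startswith p.1 ['B'] ∨ closed.2 = none) then
      some (p.1.drop 2, p.2.1)
    else closed.2
  (closed.1, curr', p.2.2)

-- final flush of Source B
def pvFinish (st : List (String × (List (String × Int))) × Option (List Char × Nat) × Nat) :
    List (String × (List (String × Int))) :=
  match st.2.1 with
  | some (ct, s0) => st.1 ++ [(String.ofList ct, pvSpanDict s0 st.2.2)]
  | none => st.1

def tags_to_spans_alt (text : String) (tokens : List String) (tags : List String) :
    List (String × (List (String × Int))) :=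
  match pvOffsets text.toList ((tokens.take tags.length).map String.toList) 0 with
  | none => []
  | some offs => pvFinish (((tags.map String.toList).zip offs).foldl pvStep ([], none, 0))

-- ===== PRECONDITION & SPEC =====
-- a token's aligned start is the previous end plus the leading whitespace run; it must match there
def pvCheckTok (cs : List Char) (st : Bool × Nat) (t : List Char) : Bool × Nat :=
  let p := st.2 + ((cs.drop st.2).takeWhile PySem.Chars.isspace).length
  (st.1 && decide ((cs.drop p).take t.length = t), p + t.length)

-- Pre_ holds exactly where the Python A returns: every processed tag (zip truncates) is nonempty
-- (tag[0] raises IndexError on '') and every processed token matches the text (else ValueError)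
def Pre_tags_to_spans (text : String) (tokens : List String) (tags : List String) : Prop :=
  (∀ tag ∈ (tags.map String.toList).take tokens.length, tag ≠ []) ∧
  (((tokens.take tags.length).map String.toList).foldl (pvCheckTok text.toList) (true, 0)).1 = true

instance (text : String) (tokens : List String) (tags : List String) : Decidable (Pre_tags_to_spans text tokens tags) := by
  unfold Pre_tags_to_spans; infer_instance

def pvWitness_tags_to_spans : String × List String × List String :=
  ("Ada  Lovelace , UK", ["Ada", "Lovelace", ",", "UK"], ["B-PER", "I-PER", "O", "B-LOC"])

def Spec_tags_to_spans (text : String) (tokens : List String) (tags : List String) (out : List (String × (List (String × Int)))) : Prop := out = tags_to_spans_alt text tokens tags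
instance (text : String) (tokens : List String) (tags : List String) (out : List (String × (List (String × Int)))) : Decidable (Spec_tags_to_spans text tokens tags out) := by unfold Spec_tags_to_spans; infer_instance

-- ===== CLAIM (what is proved, stated in full; the proofs are below) =====
def Claim_equal_tags_to_spans : Prop := ∀ (text : String) (tokens : List String) (tags : List String), Dom_tags_to_spans text tokens tags → Pre_tags_to_spans text tokens tags → Spec_tags_to_spans text tokens tags (tags_to_spans text tokens tags)

-- ===== LEMMAS AND PROOFS =====


lemma pv_startswith_B (c0 : Char) (g' : List Char) :
    PySem.Chars.startswith (c0 :: g') ['B'] = decide (c0 = 'B') := by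
  have h2 := PySem.Chars.startswith_iff (c0 :: g') ['B']
  by_cases h : c0 = 'B'
  · simp [h, List.cons_prefix_cons] at h2; simp [h, h2]
  · simp [List.cons_prefix_cons] at h2
    simp [h]
    exact Bool.eq_false_iff.mpr (fun hh => h (h2.mp hh).symm)

lemma pv_ends_eq (c : Option (List Char × Nat)) (g : List Char) (hg : g ≠ []) :
    iob2_span_ends (c.map Prod.fst) g =
      some (match c with
            | none => false
            | some (ct, _) => decide (g ≠ 'I' :: '-' :: ct)) := by
  cases c with
  | none => rfl
  | some p =>
    obtain ⟨ct, s0⟩ := p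
    simp only [Option.map_some]
    unfold iob2_span_ends
    by_cases h1 : g = 'I' :: '-' :: ct
    · simp [h1]
    · by_cases h2 : g = ['O']
      · simp [h2]
      · obtain ⟨c0, g', rfl⟩ := List.exists_cons_of_ne_nil hg
        simp only [PySem.List.pyGet?_zero_cons, h1, h2, if_false]
        split <;> simp [h1]

lemma pv_starts_eq (c : Option (List Char × Nat)) (g : List Char) (hg : g ≠ []) :
    iob2_span_starts (c.map Prod.fst) g =
      some (decide (g ≠ ['O'] ∧ (PySem.Chars.startswith g ['B'] ∨ c = none))) := by
  obtain ⟨c0, g', rfl⟩ := List.exists_cons_of_ne_nil hg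
  unfold iob2_span_starts
  by_cases h2 : c0 :: g' = ['O']
  · simp [h2]
  · simp only [PySem.List.pyGet?_zero_cons, h2, if_false, pv_startswith_B]
    by_cases hb : c0 = 'B'
    · simp [hb]
    · cases c <;> simp [hb, h2]

lemma pv_skip_eq (cs : List Char) :
    ∀ (fuel pos : Nat), cs.length - pos ≤ fuel →
      pvSkipWsAux cs fuel pos = pos + ((cs.drop pos).takeWhile PySem.Chars.isspace).length := by
  intro fuel
  induction fuel with
  | zero =>
    intro pos hle
    have : cs.drop pos = [] := List.drop_eq_nil_of_le (by omega)
    simp [pvSkipWsAux, this]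
  | succ fuel ih =>
    intro pos hle
    unfold pvSkipWsAux
    by_cases h : pos < cs.length
    · have hdrop : cs.drop pos = cs[pos] :: cs.drop (pos + 1) := List.drop_eq_getElem_cons h
      by_cases hsp : PySem.Chars.isspace cs[pos] = true
      · have hlen : ((cs.drop pos).takeWhile PySem.Chars.isspace).length
            = ((cs.drop (pos + 1)).takeWhile PySem.Chars.isspace).length + 1 := by
          rw [hdrop, List.takeWhile_cons, if_pos hsp]
          simp
        rw [dif_pos h, if_pos hsp, ih (pos + 1) (by omega), hlen]
        omega
      · have hlen : ((cs.drop pos).takeWhile PySem.Chars.isspace).length = 0 := by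
          rw [hdrop, List.takeWhile_cons, if_neg hsp]
          simp
        rw [dif_pos h, if_neg hsp, hlen]
        omega
    · have : cs.drop pos = [] := List.drop_eq_nil_of_le (by omega)
      rw [dif_neg h]
      simp [this]

lemma pv_check_false (cs : List Char) :
    ∀ (toks : List (List Char)) (pos : Nat),
      (toks.foldl (pvCheckTok cs) (false, pos)).1 = false := by
  intro toks
  induction toks with
  | nil => intro pos; rfl
  | cons t rest ih => intro pos; simpa [pvCheckTok] using ih _

lemma pv_offsets_of_aligned (cs : List Char) :
    ∀ (toks : List (List Char)) (pos : Nat),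
      (toks.foldl (pvCheckTok cs) (true, pos)).1 = true →
      ∃ offs, pvOffsets cs toks pos = some offs := by
  intro toks
  induction toks with
  | nil => intro pos _; exact ⟨[], rfl⟩
  | cons t rest ih =>
    intro pos hal
    rw [List.foldl_cons] at hal
    have hskip : pvSkipWs cs pos = pos + ((cs.drop pos).takeWhile PySem.Chars.isspace).length :=
      pv_skip_eq cs _ pos le_rfl
    by_cases hm : (cs.drop (pos + ((cs.drop pos).takeWhile PySem.Chars.isspace).length)).take t.length = t
    · have hstep : pvCheckTok cs (true, pos) t =
          (true, pos + ((cs.drop pos).takeWhile PySem.Chars.isspace).length + t.length) := by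
        simp [pvCheckTok, hm]
      rw [hstep] at hal
      obtain ⟨offs, hoffs⟩ := ih _ hal
      refine ⟨(pvSkipWs cs pos, pvSkipWs cs pos + t.length) :: offs, ?_⟩
      unfold pvOffsets
      rw [hskip]
      simp only [PySem.List.slice_natCast_add]
      simp [hm, hoffs]
    · have hstep : (pvCheckTok cs (true, pos) t).1 = false := by simp [pvCheckTok, hm]
      rw [show pvCheckTok cs (true, pos) t =
            ((pvCheckTok cs (true, pos) t).1, (pvCheckTok cs (true, pos) t).2) from rfl,
          hstep, pv_check_false cs rest _] at hal
      cases hal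

lemma pv_loopA_eq (cs : List Char) :
    ∀ (toks tgs : List (List Char)) (offset : Nat) (curr : Option (List Char × Nat))
      (spans : List (String × (List (String × Int)))) (offs : List (Nat × Nat)),
      pvOffsets cs (toks.take tgs.length) offset = some offs →
      (∀ tag ∈ tgs.take toks.length, tag ≠ []) →
      tagsToSpansLoopA cs (toks.zip tgs) offset curr spans =
        some (pvFinish ((tgs.zip offs).foldl pvStep (spans, curr, offset))) := by
  intro toks
  induction toks with
  | nil =>
    intro tgs offset curr spans offs hoffs _
    simp only [List.take_nil] at hoffs
    unfold pvOffsets at hoffs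
    injection hoffs with hoffs
    subst hoffs
    simp only [List.zip_nil_left, List.zip_nil_right, List.foldl_nil]
    cases curr <;> rfl
  | cons t ts ih =>
    intro tgs offset curr spans offs hoffs hne
    cases tgs with
    | nil =>
      simp only [List.length_nil, List.take_zero] at hoffs
      unfold pvOffsets at hoffs
      injection hoffs with hoffs
      subst hoffs
      simp only [List.zip_nil_right, List.foldl_nil]
      cases curr <;> rfl
    | cons g gs =>
      have hg : g ≠ [] := hne g (by simp)
      have hne' : ∀ tag ∈ gs.take ts.length, tag ≠ [] := by
        intro tag htag
        exact hne tag (by simp [htag])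
      simp only [List.length_cons, List.take_succ_cons] at hoffs
      rw [pvOffsets] at hoffs
      by_cases hsl : PySem.List.slice cs (some ((pvSkipWs cs offset : Nat) : Int))
          (some (((pvSkipWs cs offset : Nat) : Int) + ((t.length : Nat) : Int))) = t
      · simp only [hsl, ite_not] at hoffs
        cases ho2 : pvOffsets cs (ts.take gs.length) (pvSkipWs cs offset + t.length) with
        | none => rw [ho2] at hoffs; cases hoffs
        | some offs' =>
          rw [ho2] at hoffs
          injection hoffs with hoffs
          subst hoffs
          have hdrop : PySem.List.slice g (some 2) none = g.drop 2 := by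
            rw [PySem.List.slice_from g (by norm_num)]; rfl
          rw [List.zip_cons_cons, List.zip_cons_cons, List.foldl_cons]
          simp only [tagsToSpansLoopA]
          rw [pv_ends_eq curr g hg]
          cases curr with
          | none =>
            have hstart := pv_starts_eq none g hg
            simp only [Option.map_none] at hstart
            by_cases hO : g = ['O']
            · simp [hsl, hO, pvStep]
              exact ih gs _ none spans offs' ho2 hne'
            · simp [hsl, hstart, hO, hdrop, pvStep]
              exact ih gs _ (some (g.drop 2, pvSkipWs cs offset)) spans offs' ho2 hne'
          | some p =>
            obtain ⟨ct, s0⟩ := p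
            have hstart0 := pv_starts_eq (some (ct, s0)) g hg
            have hstartn := pv_starts_eq none g hg
            simp only [Option.map_some, Option.map_none] at hstart0 hstartn
            by_cases hI : g = 'I' :: '-' :: ct
            · subst hI
              simp [hsl, hstart0, pv_startswith_B, pvStep]
              exact ih gs _ (some (ct, s0)) spans offs' ho2 hne'
            · by_cases hO : g = ['O']
              · simp [hsl, hO, pvStep]
                exact ih gs _ none (spans ++ [(String.ofList ct, pvSpanDict s0 offset)]) offs' ho2 hne'
              · simp [hsl, hI, hstartn, hO, hdrop, pvStep]
                exact ih gs _ (some (g.drop 2, pvSkipWs cs offset)) (spans ++ [(String.ofList ct, pvSpanDict s0 offset)]) offs' ho2 hne'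
      · simp only [ne_eq, hsl, not_false_eq_true, if_true] at hoffs
        cases hoffs

-- ===== VERDICT (by name: the statement is the Claim_ definition above) =====
theorem tags_to_spans_spec : Claim_equal_tags_to_spans := by
  intro text tokens tags _ hpre
  obtain ⟨hne, hal⟩ := hpre
  unfold Spec_tags_to_spans tags_to_spans tags_to_spans_alt
  obtain ⟨offs, hoffs⟩ := pv_offsets_of_aligned text.toList _ _ hal
  have htake : ((tokens.map String.toList).take (tags.map String.toList).length) = ((tokens.take tags.length).map String.toList) := by
    simp [List.map_take]
  have hlen : (tags.map String.toList).take (tokens.map String.toList).length = (tags.map String.toList).take tokens.length := by simp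
  have := pv_loopA_eq text.toList (tokens.map String.toList) (tags.map String.toList) 0 none [] offs
    (by rw [htake]; exact hoffs) (by rw [hlen]; exact hne)
  rw [this, hoffs]
  rfl
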